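-- pv_equiv track=rewrite | github.com/gardberg/aoc | 2024_2025/2025/days/9/main.py | check_candidate
-- ===== SOURCE A (Python) =====
-- def check_candidate(points_pair, body_points):
--     (x1, y1), (x2, y2) = points_pair
--     minx, maxx = min(x1, x2), max(x1, x2)
--     miny, maxy = min(y1, y2), max(y1, y2)
--
--     # Early exit: check each point and return None if any is missing
--     for x in range(minx, maxx+1):
--         for y in range(miny, maxy+1):
--             if (x, y) not in body_points:
--                 return None
--     return points_pair
-- ===== SOURCE B (Python) =====
-- def check_candidate(points_pair, body_points):
--     (x1, y1), (x2, y2) = points_pair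
--     minx, maxx = min(x1, x2), max(x1, x2)
--     miny, maxy = min(y1, y2), max(y1, y2)
--     area = (maxx - minx + 1) * (maxy - miny + 1)
--     count = sum(1 for (x, y) in set(body_points)
--                 if minx <= x <= maxx and miny <= y <= maxy)
--     return points_pair if count == area else None
-- ===== Notes on version B (the rewrite author's own statement) =====
-- stated objective: alternative
-- what changed: Instead of nested loops over every rectangle cell with a membership scan per cell, B makes one pass over the deduplicated body_points counting points inside the bounding box and compares that count with the rectangle's area.
import Mathlib
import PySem

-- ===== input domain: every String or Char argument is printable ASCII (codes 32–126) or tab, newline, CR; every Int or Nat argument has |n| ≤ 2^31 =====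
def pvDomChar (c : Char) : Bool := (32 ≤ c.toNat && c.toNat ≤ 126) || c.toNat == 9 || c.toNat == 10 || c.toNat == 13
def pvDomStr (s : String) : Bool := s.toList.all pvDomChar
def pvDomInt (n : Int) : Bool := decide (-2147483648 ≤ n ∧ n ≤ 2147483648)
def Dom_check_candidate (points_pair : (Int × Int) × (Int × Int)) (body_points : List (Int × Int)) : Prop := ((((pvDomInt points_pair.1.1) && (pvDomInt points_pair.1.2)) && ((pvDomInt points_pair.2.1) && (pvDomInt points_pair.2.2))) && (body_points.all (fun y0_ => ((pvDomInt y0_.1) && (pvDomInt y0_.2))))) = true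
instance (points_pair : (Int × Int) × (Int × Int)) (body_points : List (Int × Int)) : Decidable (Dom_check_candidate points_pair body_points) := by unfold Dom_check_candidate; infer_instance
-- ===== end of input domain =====

-- B replaces A's nested scan over every rectangle cell by a single count over the
-- deduplicated body_points compared with the rectangle's area (objective: alternative).

-- ===== PORT A =====
-- inner 'for y in range(miny, maxy+1)' loop, iterated lazily like Python's range:
-- returns false as soon as some (x, y) is missing (A's 'return None')
def pvInnerA (bp : List (Int × Int)) (x y maxy : Int) : Bool :=
  if y < maxy + 1 then
    (if bp.contains (x, y) then pvInnerA bp x (y + 1) maxy else false)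
  else true
termination_by (maxy + 1 - y).toNat
decreasing_by omega

-- outer 'for x in range(minx, maxx+1)' loop
def pvOuterA (bp : List (Int × Int)) (x maxx miny maxy : Int) : Bool :=
  if x < maxx + 1 then
    (if pvInnerA bp x miny maxy then pvOuterA bp (x + 1) maxx miny maxy else false)
  else true
termination_by (maxx + 1 - x).toNat
decreasing_by omega

def check_candidate (points_pair : (Int × Int) × (Int × Int)) (body_points : List (Int × Int)) : Option ((Int × Int) × (Int × Int)) :=
  match points_pair with
  | ((x1, y1), (x2, y2)) =>
    let minx := min x1 x2
    let maxx := max x1 x2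
    let miny := min y1 y2
    let maxy := max y1 y2
    if pvOuterA body_points minx maxx miny maxy then some points_pair else none

-- ===== PORT B =====
def check_candidate_alt (points_pair : (Int × Int) × (Int × Int)) (body_points : List (Int × Int)) : Option ((Int × Int) × (Int × Int)) :=
  match points_pair with
  | ((x1, y1), (x2, y2)) =>
    let minx := min x1 x2
    let maxx := max x1 x2
    let miny := min y1 y2
    let maxy := max y1 y2
    let area : Int := (maxx - minx + 1) * (maxy - miny + 1)
    let count : Int := (((PySem.Set.ofList body_points).filter
      (fun p => decide (minx ≤ p.1) && decide (p.1 ≤ maxx) && decide (miny ≤ p.2) && decide (p.2 ≤ maxy))).length : Int)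
    if count = area then some points_pair else none

-- ===== PRECONDITION & SPEC =====
def Spec_check_candidate (points_pair : (Int × Int) × (Int × Int)) (body_points : List (Int × Int)) (out : Option ((Int × Int) × (Int × Int))) : Prop := out = check_candidate_alt points_pair body_points
instance (points_pair : (Int × Int) × (Int × Int)) (body_points : List (Int × Int)) (out : Option ((Int × Int) × (Int × Int))) : Decidable (Spec_check_candidate points_pair body_points out) := by unfold Spec_check_candidate; infer_instance

-- ===== CLAIM (what is proved, stated in full; the proofs are below) =====
def Claim_equal_check_candidate : Prop := ∀ (points_pair : (Int × Int) × (Int × Int)) (body_points : List (Int × Int)), Dom_check_candidate points_pair body_points → Spec_check_candidate points_pair body_points (check_candidate points_pair body_points)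

-- ===== LEMMAS AND PROOFS =====

lemma pvInnerA_true_iff (bp : List (Int × Int)) (x y maxy : Int) :
    pvInnerA bp x y maxy = true ↔ ∀ z, y ≤ z → z ≤ maxy → (x, z) ∈ bp := by
  fun_induction pvInnerA bp x y maxy with
  | case1 y h hc ih =>
    rw [ih]
    constructor
    · intro hall z hz1 hz2
      rcases eq_or_lt_of_le hz1 with rfl | hlt
      · exact List.contains_iff_mem.1 hc
      · exact hall z (by omega) hz2
    · intro hall z hz1 hz2
      exact hall z (by omega) hz2
  | case2 y h hc =>
    simp only [Bool.false_eq_true, false_iff, not_forall]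
    exact ⟨y, le_refl y, by omega, fun hm => hc (List.contains_iff_mem.2 hm)⟩
  | case3 y h =>
    simp only [true_iff]
    intro z hz1 hz2
    omega

lemma pvOuterA_true_iff (bp : List (Int × Int)) (x maxx miny maxy : Int) :
    pvOuterA bp x maxx miny maxy = true ↔
      ∀ u z, x ≤ u → u ≤ maxx → miny ≤ z → z ≤ maxy → (u, z) ∈ bp := by
  fun_induction pvOuterA bp x maxx miny maxy with
  | case1 x h hc ih =>
    rw [ih]
    rw [pvInnerA_true_iff] at hc
    constructor
    · intro hall u z hu1 hu2 hz1 hz2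
      rcases eq_or_lt_of_le hu1 with rfl | hlt
      · exact hc z hz1 hz2
      · exact hall u z (by omega) hu2 hz1 hz2
    · intro hall u z hu1 hu2 hz1 hz2
      exact hall u z (by omega) hu2 hz1 hz2
  | case2 x h hc =>
    rw [pvInnerA_true_iff] at hc
    simp only [Bool.false_eq_true, false_iff, not_forall]
    push Not at hc
    obtain ⟨z, hz1, hz2, hm⟩ := hc
    exact ⟨x, z, le_refl x, by omega, hz1, hz2, hm⟩
  | case3 x h =>
    simp only [true_iff]
    intro u z hu1 hu2 hz1 hz2
    omega

-- the rectangle as a Finset, its cardinality is the area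
lemma pvRect_card (minx maxx miny maxy : Int) (hx : minx ≤ maxx) (hy : miny ≤ maxy) :
    (((Finset.Icc minx maxx) ×ˢ (Finset.Icc miny maxy)).card : Int)
      = (maxx - minx + 1) * (maxy - miny + 1) := by
  rw [Finset.card_product, Int.card_Icc, Int.card_Icc]
  push_cast
  rw [Int.toNat_of_nonneg (by omega), Int.toNat_of_nonneg (by omega)]
  ring

-- the core counting fact: the count of distinct in-rectangle body points equals
-- the area iff every rectangle point is in bp
lemma pvCount_iff (bp : List (Int × Int)) (minx maxx miny maxy : Int)
    (hx : minx ≤ maxx) (hy : miny ≤ maxy) :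
    ((((PySem.Set.ofList bp).filter
        (fun p => decide (minx ≤ p.1) && decide (p.1 ≤ maxx) && decide (miny ≤ p.2) && decide (p.2 ≤ maxy))).length : Int)
      = (maxx - minx + 1) * (maxy - miny + 1)) ↔
      ∀ x y, minx ≤ x → x ≤ maxx → miny ≤ y → y ≤ maxy → (x, y) ∈ bp := by
  set f : Int × Int → Bool :=
    fun p => decide (minx ≤ p.1) && decide (p.1 ≤ maxx) && decide (miny ≤ p.2) && decide (p.2 ≤ maxy) with hf
  set F : List (Int × Int) := (PySem.Set.ofList bp).filter f with hF
  set R : Finset (Int × Int) := (Finset.Icc minx maxx) ×ˢ (Finset.Icc miny maxy) with hR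
  have hmemS : ∀ p, p ∈ PySem.Set.ofList bp ↔ p ∈ bp := fun p => PySem.Set.mem_ofList ..
  have hnd : F.Nodup := (PySem.Set.nodup_ofList bp).filter f
  have hmemF : ∀ p : Int × Int, p ∈ F ↔ (p ∈ bp ∧ p ∈ R) := by
    intro p
    simp [hF, List.mem_filter, hmemS, hf, hR, Finset.mem_product, Finset.mem_Icc]
    tauto
  have hsub : F.toFinset ⊆ R := by
    intro p hp
    exact ((hmemF p).1 (List.mem_toFinset.1 hp)).2
  have hlen : F.length = F.toFinset.card := (List.toFinset_card_of_nodup hnd).symm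
  have harea := pvRect_card minx maxx miny maxy hx hy
  constructor
  · intro hcount x y hx1 hx2 hy1 hy2
    have hcard : R.card ≤ F.toFinset.card := by
      have : (F.toFinset.card : Int) = (R.card : Int) := by
        rw [← hlen, harea]; exact hcount
      omega
    have heq : F.toFinset = R := Finset.eq_of_subset_of_card_le hsub hcard
    have hpR : (x, y) ∈ R := by
      simp [hR, Finset.mem_product, Finset.mem_Icc]; omega
    rw [← heq] at hpR
    exact ((hmemF _).1 (List.mem_toFinset.1 hpR)).1
  · intro h
    have heq : F.toFinset = R := by
      apply Finset.Subset.antisymm hsub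
      intro p hp
      have hpR : p ∈ R := hp
      have hpIcc := hpR
      simp only [hR, Finset.mem_product, Finset.mem_Icc] at hpIcc
      refine List.mem_toFinset.2 ((hmemF p).2 ⟨?_, hpR⟩)
      exact h p.1 p.2 hpIcc.1.1 hpIcc.1.2 hpIcc.2.1 hpIcc.2.2
    rw [hlen, heq, ← harea]
  
theorem pv_main (points_pair : (Int × Int) × (Int × Int)) (body_points : List (Int × Int)) :
    check_candidate points_pair body_points = check_candidate_alt points_pair body_points := by
  obtain ⟨⟨x1, y1⟩, ⟨x2, y2⟩⟩ := points_pair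
  simp only [check_candidate, check_candidate_alt]
  have h := pvCount_iff body_points (min x1 x2) (max x1 x2) (min y1 y2) (max y1 y2)
    (min_le_max) (min_le_max)
  have h2 := pvOuterA_true_iff body_points (min x1 x2) (max x1 x2) (min y1 y2) (max y1 y2)
  by_cases hc : ∀ x y, min x1 x2 ≤ x → x ≤ max x1 x2 → min y1 y2 ≤ y → y ≤ max y1 y2 → (x, y) ∈ body_points
  · rw [if_pos (h2.2 hc), if_pos (h.2 hc)]
  · rw [if_neg (fun hb => hc (h2.1 hb)), if_neg (fun hb => hc (h.1 hb))]

-- ===== VERDICT (by name: the statement is the Claim_ definition above) =====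
theorem check_candidate_spec : Claim_equal_check_candidate := by
  intro points_pair body_points _
  unfold Spec_check_candidate
  exact pv_main points_pair body_points
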